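-- pv_equiv track=rewrite | github.com/michaelayoade/dotmac_erp | scripts/fix_sidebar_partials.py | find_switch_module_block
-- ===== SOURCE A (Python) =====
-- def find_switch_module_block(lines: list[str]) -> tuple[int, int] | None:
--     """Find the start and end of the inline Switch Module block.
--
--     Returns (start_line_idx, end_line_idx) where end is the last line of the block.
--     The block starts at the "Switch Module" divider comment/section
--     and ends at the closing </nav>.
--     """
--     start = None
--     for i, line in enumerate(lines):
--         # Look for the Switch Module section start
--         if "Switch Module" in line and start is None:
--             # Go back to find the comment or div that starts this section
--             j = i
--             while j > 0 and lines[j - 1].strip().startswith("<!--"):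
--                 j -= 1
--             start = j
--             break
--
--     if start is None:
--         return None
--
--     # Find the </nav> that closes the navigation section
--     end = None
--     for i in range(start, len(lines)):
--         stripped = lines[i].strip()
--         if stripped == "</nav>":
--             end = i  # The line BEFORE </nav> is the last line of the block
--             break
--
--     if end is None:
--         return None
--
--     return (start, end)
-- ===== SOURCE B (Python) =====
-- def find_switch_module_block(lines):
--     """Single forward pass: track the start of the current run of '<!--' comment
--     lines; on the first 'Switch Module' line fix the block start, then keep
--     scanning the same loop for the closing '</nav>'."""
--     comment_run_start = None
--     start = None
--     for i, line in enumerate(lines):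
--         if start is not None:
--             if line.strip() == "</nav>":
--                 return (start, i)
--         elif "Switch Module" in line:
--             start = comment_run_start if comment_run_start is not None else i
--         elif line.strip().startswith("<!--"):
--             if comment_run_start is None:
--                 comment_run_start = i
--         else:
--             comment_run_start = None
--     return None
-- ===== Notes on version B (the rewrite author's own statement) =====
-- stated objective: alternative
-- what changed: A finds the 'Switch Module' line, walks backwards over the preceding '<!--' comment run, then rescans from that start for '</nav>'; B is one forward pass that tracks the start of the current comment run and keeps scanning the same loop for '</nav>' once the block start is fixed.
import Mathlib
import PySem

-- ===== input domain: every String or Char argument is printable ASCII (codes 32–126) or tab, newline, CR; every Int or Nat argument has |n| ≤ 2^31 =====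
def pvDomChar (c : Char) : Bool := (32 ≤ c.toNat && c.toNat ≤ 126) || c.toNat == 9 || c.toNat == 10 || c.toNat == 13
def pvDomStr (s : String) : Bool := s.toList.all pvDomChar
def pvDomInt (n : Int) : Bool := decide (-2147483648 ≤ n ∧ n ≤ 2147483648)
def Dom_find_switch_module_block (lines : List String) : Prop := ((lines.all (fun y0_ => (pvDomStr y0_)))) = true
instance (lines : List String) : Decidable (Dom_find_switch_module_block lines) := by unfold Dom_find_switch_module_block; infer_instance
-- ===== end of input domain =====

-- B replaces A's two scans (find "Switch Module" then walk back over comment lines, then a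
-- second scan for "</nav>") by ONE forward pass that tracks the start of the current comment run;
-- objective: alternative decomposition (single pass), same exact return value.

-- ===== PORT A =====
-- first loop: for i, line in enumerate(lines): if "Switch Module" in line …: break
def aFindGo (i : Nat) : List String → Option Nat
  | [] => none
  | line :: rest =>
    if PySem.Str.isIn "Switch Module" line then some i else aFindGo (i + 1) rest

-- while j > 0 and lines[j-1].strip().startswith("<!--"): j -= 1   (j ≤ i < len, so lines[j-1] is in range)
def aBack (lines : List String) : Nat → Nat
  | 0 => 0
  | j + 1 =>
    if PySem.Str.startswith (PySem.Str.strip (lines.getD j "")) "<!--" then aBack lines j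
    else j + 1

-- second loop: for i in range(start, len(lines)): if lines[i].strip() == "</nav>": break
def aEndGo (i : Nat) : List String → Option Nat
  | [] => none
  | line :: rest =>
    if PySem.Str.strip line == "</nav>" then some i else aEndGo (i + 1) rest

def find_switch_module_block (lines : List String) : Option (Int × Int) :=
  match aFindGo 0 lines with
  | none => none
  | some i =>
    let start := aBack lines i
    match aEndGo start (lines.drop start) with
    | none => none
    | some e => some ((start : Int), (e : Int))

-- ===== PORT B =====
-- single pass; crs = start of the current unbroken run of '<!--' comment lines, start? = block start once found
def altGo (crs start? : Option Nat) (i : Nat) : List String → Option (Int × Int)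
  | [] => none
  | line :: rest =>
    match start? with
    | some s =>
      if PySem.Str.strip line == "</nav>" then some ((s : Int), (i : Int))
      else altGo crs (some s) (i + 1) rest
    | none =>
      if PySem.Str.isIn "Switch Module" line then
        altGo crs (some (crs.getD i)) (i + 1) rest
      else if PySem.Str.startswith (PySem.Str.strip line) "<!--" then
        altGo (some (crs.getD i)) none (i + 1) rest
      else
        altGo none none (i + 1) rest

def find_switch_module_block_alt (lines : List String) : Option (Int × Int) :=
  altGo none none 0 lines

-- ===== PRECONDITION & SPEC =====
def Spec_find_switch_module_block (lines : List String) (out : Option (Int × Int)) : Prop := out = find_switch_module_block_alt lines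
instance (lines : List String) (out : Option (Int × Int)) : Decidable (Spec_find_switch_module_block lines out) := by unfold Spec_find_switch_module_block; infer_instance

-- ===== CLAIM (what is proved, stated in full; the proofs are below) =====
def Claim_equal_find_switch_module_block : Prop := ∀ (lines : List String), Dom_find_switch_module_block lines → Spec_find_switch_module_block lines (find_switch_module_block lines)

-- ===== LEMMAS AND PROOFS =====

-- a character of a string is a character of its strip, or whitespace
lemma mem_strip_of_mem {c : Char} {cs : List Char} (h : c ∈ cs) :
    c ∈ PySem.Chars.strip cs ∨ PySem.Chars.isspace c = true := by
  by_cases hs : PySem.Chars.isspace c = true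
  · exact Or.inr hs
  · left
    unfold PySem.Chars.strip PySem.Chars.rstrip PySem.Chars.lstrip
    have step : ∀ l : List Char, c ∈ l → c ∈ l.dropWhile PySem.Chars.isspace := by
      intro l hl
      have : c ∈ l.takeWhile PySem.Chars.isspace ++ l.dropWhile PySem.Chars.isspace := by
        rw [List.takeWhile_append_dropWhile]; exact hl
      rcases List.mem_append.mp this with h' | h'
      · exact absurd (List.mem_takeWhile_imp h') hs
      · exact h'
    exact List.mem_reverse.mpr (step _ (List.mem_reverse.mpr (step _ h)))

-- a line containing "Switch Module" does not strip to "</nav>"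
lemma not_nav_of_switch {line : String} (h : PySem.Str.isIn "Switch Module" line = true) :
    PySem.Str.strip line ≠ "</nav>" := by
  intro heq
  have hinf : ("Switch Module").toList <:+: line.toList := (PySem.Str.isIn_iff_infix _ _).mp h
  have hS : 'S' ∈ line.toList := hinf.mem (by decide)
  have : 'S' ∈ PySem.Chars.strip line.toList ∨ PySem.Chars.isspace 'S' = true := mem_strip_of_mem hS
  have hst : PySem.Chars.strip line.toList = ("</nav>" : String).toList := by
    have := congrArg String.toList heq
    simpa [PySem.Str.strip] using this
  rw [hst] at this
  rcases this with h' | h' <;> revert h' <;> decide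

-- a comment line does not strip to "</nav>"
lemma not_nav_of_comment {line : String}
    (h : PySem.Str.startswith (PySem.Str.strip line) "<!--" = true) :
    PySem.Str.strip line ≠ "</nav>" := by
  intro heq; rw [heq] at h; revert h; decide

lemma aBack_le (lines : List String) (i : Nat) : aBack lines i ≤ i := by
  induction i with
  | zero => simp [aBack]
  | succ j ih => unfold aBack; split <;> omega

-- everything strictly between the back-walk result and i is a comment line
lemma aBack_comment (lines : List String) (i : Nat) :
    ∀ k, aBack lines i ≤ k → k < i →
      PySem.Str.startswith (PySem.Str.strip (lines.getD k "")) "<!--" = true := by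
  induction i with
  | zero => intro k h1 h2; omega
  | succ j ih =>
    intro k h1 h2
    unfold aBack at h1
    split at h1
    · rcases Nat.lt_succ_iff_lt_or_eq.mp h2 with h | h
      · exact ih k h1 h
      · subst h; assumption
    · omega

-- the found-phase of B is A's second scan
lemma altGo_found (crs : Option Nat) (s : Nat) :
    ∀ (rest : List String) (i : Nat),
      altGo crs (some s) i rest =
        match aEndGo i rest with
        | none => none
        | some e => some ((s : Int), (e : Int)) := by
  intro rest
  induction rest with
  | nil => intro i; simp [altGo, aEndGo]
  | cons line rest ih =>
    intro i
    by_cases h : PySem.Str.strip line == "</nav>"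
    · simp [altGo, aEndGo, h]
    · simp only [altGo, aEndGo, h, if_neg, Bool.false_eq_true, not_false_iff]
      exact ih (i + 1)

-- skipping non-"</nav>" lines in A's second scan
lemma aEndGo_skip (lines : List String) :
    ∀ (d s : Nat), s + d ≤ lines.length →
      (∀ k, s ≤ k → k < s + d → PySem.Str.strip (lines.getD k "") ≠ "</nav>") →
      aEndGo s (lines.drop s) = aEndGo (s + d) (lines.drop (s + d)) := by
  intro d
  induction d with
  | zero => intro s _ _; rfl
  | succ d ih =>
    intro s hlen hk
    have hs : s < lines.length := by omega
    have hdrop : lines.drop s = lines[s] :: lines.drop (s + 1) :=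
      List.drop_eq_getElem_cons hs
    have hgd : lines.getD s "" = lines[s] := by
      simp [List.getD, List.getElem?_eq_getElem hs]
    have hne : PySem.Str.strip lines[s] ≠ "</nav>" := by
      have := hk s (le_refl s) (by omega); rwa [hgd] at this
    rw [hdrop]
    have hcond : (PySem.Str.strip lines[s] == "</nav>") = false := by
      simp [hne]
    rw [show aEndGo s (lines[s] :: lines.drop (s + 1)) = aEndGo (s + 1) (lines.drop (s + 1)) by
      simp [aEndGo, hcond]]
    have e : s + 1 + d = s + (d + 1) := by omega
    have := ih (s + 1) (by omega) (by intro k h1 h2; exact hk k (by omega) (by omega))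
    rw [e] at this; exact this

-- main invariant: B's single pass agrees with A's staged computation
lemma altGo_main (lines : List String) :
    ∀ (rest : List String) (i : Nat) (crs : Option Nat),
      rest = lines.drop i →
      aBack lines i = crs.getD i →
      altGo crs none i rest =
        match aFindGo i rest with
        | none => none
        | some k =>
          match aEndGo (aBack lines k) (lines.drop (aBack lines k)) with
          | none => none
          | some e => some (((aBack lines k) : Int), (e : Int)) := by
  intro rest
  induction rest with
  | nil => intro i crs _ _; simp [altGo, aFindGo]
  | cons line rest ih =>
    intro i crs hdrop hinv
    have hi : i < lines.length := by
      by_contra h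
      have he : lines.drop i = [] := List.drop_eq_nil_of_le (by omega)
      rw [he] at hdrop; exact List.cons_ne_nil _ _ hdrop
    have hline : lines[i] = line := by
      have := congrArg (fun l => l.head?) hdrop
      simpa [List.head?_drop, List.getElem?_eq_getElem hi] using this.symm
    have hrest : rest = lines.drop (i + 1) := by
      have := congrArg (fun l => l.tail) hdrop
      simpa [List.tail_drop] using this
    have hgd : lines.getD i "" = line := by
      simp [List.getD, List.getElem?_eq_getElem hi, hline]
    by_cases hsm : PySem.Str.isIn "Switch Module" line = true
    · -- "Switch Module" found at i: A's start = aBack lines i = crs.getD i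
      have hfind : aFindGo i (line :: rest) = some i := by
        simp only [aFindGo]; rw [if_pos hsm]
      have hB : altGo crs none i (line :: rest)
          = altGo crs (some (crs.getD i)) (i + 1) rest := by
        simp only [altGo]; rw [if_pos hsm]
      have hle : aBack lines i ≤ i := aBack_le lines i
      -- A's second scan from aBack lines i equals the scan from i+1
      have hskip : aEndGo (aBack lines i) (lines.drop (aBack lines i))
          = aEndGo (i + 1) (lines.drop (i + 1)) := by
        have harith : aBack lines i + (i + 1 - aBack lines i) = i + 1 := by omega
        have := aEndGo_skip lines (i + 1 - aBack lines i) (aBack lines i)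
          (by omega)
          (by
            intro k h1 h2
            have hk_lt : k < i + 1 := by omega
            rcases Nat.lt_succ_iff_lt_or_eq.mp hk_lt with h | h
            · exact not_nav_of_comment (aBack_comment lines i k h1 h)
            · subst h; rw [hgd]; exact not_nav_of_switch hsm)
        rw [harith] at this; exact this
      rw [hfind, hB, altGo_found, hrest, ← hskip, ← hinv]
    · have hfind : aFindGo i (line :: rest) = aFindGo (i + 1) rest := by
        simp only [aFindGo]; rw [if_neg hsm]
      rw [hfind]
      by_cases hc : PySem.Str.startswith (PySem.Str.strip line) "<!--" = true
      · have hB : altGo crs none i (line :: rest)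
            = altGo (some (crs.getD i)) none (i + 1) rest := by
          simp only [altGo]; rw [if_neg hsm, if_pos hc]
        rw [hB]
        exact ih (i + 1) (some (crs.getD i)) hrest
          (by unfold aBack; rw [hgd, if_pos hc]; simpa using hinv)
      · have hB : altGo crs none i (line :: rest)
            = altGo none none (i + 1) rest := by
          simp only [altGo]; rw [if_neg hsm, if_neg hc]
        rw [hB]
        exact ih (i + 1) none hrest
          (by unfold aBack; rw [hgd, if_neg hc]; rfl)

-- ===== VERDICT (by name: the statement is the Claim_ definition above) =====
theorem find_switch_module_block_spec : Claim_equal_find_switch_module_block := by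
  unfold Claim_equal_find_switch_module_block
  intro lines _
  unfold Spec_find_switch_module_block
  unfold find_switch_module_block find_switch_module_block_alt
  rw [altGo_main lines lines 0 none (by simp) (by simp [aBack])]
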